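-- pv_equiv track=rewrite | github.com/mateuszwosinski/ocr-with-bert | modules/typo_correction/typo_correction_infer.py | _find_segments
-- ===== SOURCE A (Python) =====
-- from typing import List
--
-- def _find_segments(org_text: List[str],
--                    tokenized_text: List[str]
--                    ) -> List[int]:
--     """Split tokenized text into sentences based on first upper letter"""
--     ix = 0
--     segment_value = -1
--     segments = []
--     for token in tokenized_text:
--         if token.startswith('##'):
--             segments.append(segment_value)
--             continue
--         if (org_text[ix][0].isupper()) or (ix == 0):
--             segment_value += 1
--         segments.append(segment_value)
--         ix += 1
--     return segments
-- ===== SOURCE B (Python) =====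
-- def _find_segments(org_text, tokenized_text):
--     """Two-pass: precompute a segment index per consumed word, then read it off."""
--     k = sum(1 for t in tokenized_text if not t.startswith('##'))
--     word_segment = []
--     seg = -1
--     for i in range(k):
--         if org_text[i][0].isupper() or i == 0:
--             seg += 1
--         word_segment.append(seg)
--     out = []
--     ptr = 0
--     for t in tokenized_text:
--         if t.startswith('##'):
--             out.append(word_segment[ptr - 1] if ptr > 0 else -1)
--         else:
--             out.append(word_segment[ptr])
--             ptr += 1
--     return out
-- ===== Notes on version B (the rewrite author's own statement) =====
-- stated objective: alternative
-- what changed: A interleaves word consumption and token emission in one loop carrying mutable state; B first precomputes a per-word segment table over exactly the consumed words, then maps tokens to table entries with a word pointer.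
import Mathlib
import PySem

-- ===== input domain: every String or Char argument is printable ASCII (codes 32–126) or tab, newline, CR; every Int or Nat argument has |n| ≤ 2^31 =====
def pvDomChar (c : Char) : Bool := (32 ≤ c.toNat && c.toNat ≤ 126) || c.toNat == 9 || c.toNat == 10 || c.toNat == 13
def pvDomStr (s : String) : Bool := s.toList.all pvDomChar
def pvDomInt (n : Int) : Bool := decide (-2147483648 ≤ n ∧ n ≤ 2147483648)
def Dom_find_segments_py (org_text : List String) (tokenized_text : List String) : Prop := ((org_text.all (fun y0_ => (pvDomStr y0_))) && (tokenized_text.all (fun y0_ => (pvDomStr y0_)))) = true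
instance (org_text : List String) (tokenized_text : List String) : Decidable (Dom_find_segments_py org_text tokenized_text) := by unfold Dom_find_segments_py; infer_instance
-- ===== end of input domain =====

-- B precomputes a segment table over the consumed words, then maps tokens to it (alternative
-- decomposition, same cost). Equivalence is about the return value; neither program mutates inputs.

-- ===== PORT A =====
-- org_text[ix][0].isupper(): exact wherever Pre_ holds (ix in range, word nonempty);
-- the getD defaults are only reached on inputs where the Python raises (excluded by Pre_).
def pvUpper1 (org : List String) (i : Nat) : Bool :=
  PySem.Chars.isupper (((((PySem.List.pyGet? org (i : Int)).getD "").toList)[0]?).getD ' ')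

-- the Python for-loop with state (ix, segment_value), emitting segments in order
def goA (org : List String) (toks : List String) (ix : Nat) (sv : Int) : List Int :=
  match toks with
  | [] => []
  | t :: ts =>
    if PySem.Str.startswith t "##" then sv :: goA org ts ix sv
    else
      let sv' := if pvUpper1 org ix || ix == 0 then sv + 1 else sv
      sv' :: goA org ts (ix + 1) sv'

def find_segments_py (org_text : List String) (tokenized_text : List String) : List Int :=
  goA org_text tokenized_text 0 (-1)

-- ===== PORT B =====
-- first pass of Source B: word_segment table for word indices i..i+n-1, seg accumulator
def pvBuild (org : List String) (i : Nat) (n : Nat) (seg : Int) : List Int :=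
  match n with
  | 0 => []
  | n + 1 =>
    let seg' := if pvUpper1 org i || i == 0 then seg + 1 else seg
    seg' :: pvBuild org (i + 1) n seg'

-- second pass of Source B: word pointer ptr into the table ('word_segment[ptr-1] if ptr > 0 else -1';
-- the getD defaults are unreachable: ptr stays below the table length)
def pvEmit (table : List Int) (toks : List String) (ptr : Nat) : List Int :=
  match toks with
  | [] => []
  | t :: ts =>
    if PySem.Str.startswith t "##" then
      (if ptr > 0 then (table[ptr - 1]?).getD (-1) else -1) :: pvEmit table ts ptr
    else
      ((table[ptr]?).getD 0) :: pvEmit table ts (ptr + 1)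

def find_segments_py_alt (org_text : List String) (tokenized_text : List String) : List Int :=
  let k := (tokenized_text.filter (fun t => !PySem.Str.startswith t "##")).length
  pvEmit (pvBuild org_text 0 k (-1)) tokenized_text 0

-- ===== PRECONDITION & SPEC =====
-- Pre_ excludes exactly the inputs where the Python raises IndexError: more non-'##' tokens
-- than words in org_text, or an empty string among the consumed words.
def Pre_find_segments_py (org_text : List String) (tokenized_text : List String) : Prop :=
  let k := (tokenized_text.filter (fun t => !PySem.Str.startswith t "##")).length
  k ≤ org_text.length ∧ ∀ w ∈ org_text.take k, w ≠ ""
instance (org_text : List String) (tokenized_text : List String) : Decidable (Pre_find_segments_py org_text tokenized_text) := by unfold Pre_find_segments_py; infer_instance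

def pvWitness_find_segments_py : List String × List String :=
  (["Hello", "world"], ["Hel", "##lo", "world"])

def Spec_find_segments_py (org_text : List String) (tokenized_text : List String) (out : List Int) : Prop := out = find_segments_py_alt org_text tokenized_text
instance (org_text : List String) (tokenized_text : List String) (out : List Int) : Decidable (Spec_find_segments_py org_text tokenized_text out) := by unfold Spec_find_segments_py; infer_instance

-- ===== CLAIM (what is proved, stated in full; the proofs are below) =====
def Claim_equal_find_segments_py : Prop := ∀ (org_text : List String) (tokenized_text : List String), Dom_find_segments_py org_text tokenized_text → Pre_find_segments_py org_text tokenized_text → Spec_find_segments_py org_text tokenized_text (find_segments_py org_text tokenized_text)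

-- ===== LEMMAS AND PROOFS =====

-- core invariant: with ptr = ix, sv the last emitted table entry (or -1), and the table's
-- suffix from ix equal to the freshly built rows for the remaining non-'##' tokens,
-- A's interleaved loop and B's second pass emit the same list.
theorem pv_main (org : List String) (toks : List String) :
    ∀ (ix : Nat) (sv : Int) (table : List Int),
      (if ix = 0 then sv = -1 else table[ix - 1]? = some sv) →
      table.drop ix = pvBuild org ix ((toks.filter (fun t => !PySem.Str.startswith t "##")).length) sv →
      goA org toks ix sv = pvEmit table toks ix := by
  induction toks with
  | nil => intro ix sv table _ _; rfl
  | cons t ts ih =>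
    intro ix sv table hlast hdrop
    cases hsw : PySem.Str.startswith t "##" with
    | true =>
      have hcount : (List.filter (fun t => !PySem.Str.startswith t "##") (t :: ts)).length
          = (List.filter (fun t => !PySem.Str.startswith t "##") ts).length := by
        rw [List.filter_cons]
        simp only [PySem.Str.startswith_eq,
          show "##".toList = ['#', '#'] from rfl] at hsw
        simp [hsw]
      simp only [goA, pvEmit, hsw, if_true]
      have hhead : (if ix > 0 then (table[ix - 1]?).getD (-1) else (-1 : Int)) = sv := by
        by_cases h0 : ix = 0
        · simp [h0] at hlast ⊢; omega
        · have hpos : ix > 0 := Nat.pos_of_ne_zero h0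
          simp only [h0, if_false] at hlast
          simp [hpos, hlast]
      rw [hhead]
      refine congrArg (sv :: ·) (ih ix sv table hlast ?_)
      rw [hdrop, hcount]
    | false =>
      have hcount : (List.filter (fun t => !PySem.Str.startswith t "##") (t :: ts)).length
          = (List.filter (fun t => !PySem.Str.startswith t "##") ts).length + 1 := by
        rw [List.filter_cons]
        simp only [PySem.Str.startswith_eq,
          show "##".toList = ['#', '#'] from rfl] at hsw
        simp [hsw]
      rw [hcount] at hdrop
      simp only [pvBuild] at hdrop
      set sv' := if pvUpper1 org ix || ix == 0 then sv + 1 else sv with hsv'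
      have hget : table[ix]? = some sv' := by
        have := congrArg List.head? hdrop
        simpa [List.head?_drop] using this
      have hdrop' : table.drop (ix + 1) = pvBuild org (ix + 1)
          ((List.filter (fun t => !PySem.Str.startswith t "##") ts).length) sv' := by
        have := congrArg List.tail hdrop
        simpa [List.tail_drop] using this
      simp only [goA, pvEmit, hsw]
      rw [hget]
      refine congrArg (fun l => sv' :: l) (ih (ix + 1) sv' table ?_ hdrop')
      simpa using hget

theorem find_segments_py_spec_aux (org toks : List String) :
    find_segments_py org toks = find_segments_py_alt org toks := by
  unfold find_segments_py find_segments_py_alt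
  exact pv_main org toks 0 (-1) _ (by simp) (by simp)

-- ===== VERDICT (by name: the statement is the Claim_ definition above) =====
theorem find_segments_py_spec : Claim_equal_find_segments_py := by
  intro org toks _ _
  unfold Spec_find_segments_py
  exact find_segments_py_spec_aux org toks
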